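-- pv_equiv track=rewrite | github.com/queelius/mcts-reasoning | mcts_reasoning/bench/benchmarks/combinatorial_verifier.py | verify_seating
-- ===== SOURCE A (Python) =====
-- def verify_seating(names: list[str], constraints: list[tuple[str, str]],
--                    candidate: list[str]) -> bool:
--     """Check if a seating arrangement satisfies adjacency constraints."""
--     if set(candidate) != set(names):
--         return False  # must use all names exactly once
--     if len(candidate) != len(set(candidate)):
--         return False  # no duplicates
--     for a, b in constraints:
--         if a in candidate and b in candidate:
--             ia = candidate.index(a)
--             ib = candidate.index(b)
--             if abs(ia - ib) == 1:
--                 return False  # a and b are adjacent, constraint violated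
--     return True
-- ===== SOURCE B (Python) =====
-- def verify_seating(names: list[str], constraints: list[tuple[str, str]],
--                    candidate: list[str]) -> bool:
--     """Check if a seating arrangement satisfies adjacency constraints."""
--     if set(candidate) != set(names):
--         return False  # must use all names exactly once
--     if len(candidate) != len(set(candidate)):
--         return False  # no duplicates
--     # Build the adjacency table once: every ordered pair of neighbours.
--     adj = set()
--     for x, y in zip(candidate, candidate[1:]):
--         adj.add((x, y))
--         adj.add((y, x))
--     # A constraint is violated exactly when its pair sits in the table.
--     return all((a, b) not in adj for a, b in constraints)
-- ===== Notes on version B (the rewrite author's own statement) =====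
-- stated objective: alternative
-- what changed: Replaced the constraint-driven loop that rescans candidate with `in` and two `.index` calls per constraint by a single pass over consecutive positions building a set of neighbour pairs, then one membership test per constraint.
import Mathlib
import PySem

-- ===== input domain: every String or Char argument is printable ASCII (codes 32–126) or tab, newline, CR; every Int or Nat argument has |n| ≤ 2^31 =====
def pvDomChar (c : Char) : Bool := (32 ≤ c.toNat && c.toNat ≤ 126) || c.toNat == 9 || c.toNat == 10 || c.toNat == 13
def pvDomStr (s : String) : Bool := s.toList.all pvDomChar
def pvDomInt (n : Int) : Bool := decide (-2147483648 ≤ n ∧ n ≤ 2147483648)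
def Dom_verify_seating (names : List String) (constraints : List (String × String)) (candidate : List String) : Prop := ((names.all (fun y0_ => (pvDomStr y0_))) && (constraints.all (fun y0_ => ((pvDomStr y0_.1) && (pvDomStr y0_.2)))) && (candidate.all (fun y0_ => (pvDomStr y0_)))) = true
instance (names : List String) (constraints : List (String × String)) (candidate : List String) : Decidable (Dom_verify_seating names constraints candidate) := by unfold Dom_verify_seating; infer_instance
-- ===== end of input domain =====

-- B replaces A's per-constraint rescans of `candidate` (`in` tests and two `.index` calls
-- per constraint) by one pass building a set of neighbouring pairs, then one membership
-- test per constraint (objective: alternative).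

-- ===== PORT A =====
-- the `for a, b in constraints:` loop with its early `return False`
def vsLoopA (candidate : List String) : List (String × String) → Bool
  | [] => true
  | (a, b) :: rest =>
    if candidate.contains a && candidate.contains b then
      match PySem.List.index? candidate a, PySem.List.index? candidate b with
      | some ia, some ib =>
        if ((ia : Int) - (ib : Int)).natAbs == 1 then false else vsLoopA candidate rest
      | _, _ => vsLoopA candidate rest   -- unreachable: both elements are in candidate
    else vsLoopA candidate rest

def verify_seating (names : List String) (constraints : List (String × String)) (candidate : List String) : Bool :=
  if !(PySem.Set.equal (PySem.Set.ofList candidate) (PySem.Set.ofList names)) then false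
  else if candidate.length != (PySem.Set.ofList candidate).length then false
  else vsLoopA candidate constraints

-- ===== PORT B =====
-- `for x, y in zip(candidate, candidate[1:]): adj.add((x, y)); adj.add((y, x))`
def vsAdj (candidate : List String) : PySem.Set (String × String) :=
  (candidate.zip (candidate.drop 1)).foldl
    (fun s p => PySem.Set.add (PySem.Set.add s (p.1, p.2)) (p.2, p.1)) PySem.Set.empty

def verify_seating_alt (names : List String) (constraints : List (String × String)) (candidate : List String) : Bool :=
  if !(PySem.Set.equal (PySem.Set.ofList candidate) (PySem.Set.ofList names)) then false
  else if candidate.length != (PySem.Set.ofList candidate).length then false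
  else
    constraints.all (fun c => !(PySem.Set.contains (vsAdj candidate) (c.1, c.2)))

-- ===== PRECONDITION & SPEC =====
def Spec_verify_seating (names : List String) (constraints : List (String × String)) (candidate : List String) (out : Bool) : Prop := out = verify_seating_alt names constraints candidate
instance (names : List String) (constraints : List (String × String)) (candidate : List String) (out : Bool) : Decidable (Spec_verify_seating names constraints candidate out) := by unfold Spec_verify_seating; infer_instance

-- ===== CLAIM (what is proved, stated in full; the proofs are below) =====
def Claim_equal_verify_seating : Prop := ∀ (names : List String) (constraints : List (String × String)) (candidate : List String), Dom_verify_seating names constraints candidate → Spec_verify_seating names constraints candidate (verify_seating names constraints candidate)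

-- ===== LEMMAS AND PROOFS =====

theorem discard_sub {α : Type} [BEq α] (s : List α) (x : α) :
    (PySem.Set.discard s x).Sublist s := by
  simp [PySem.Set.discard]

theorem ofList_sub {α : Type} [BEq α] [LawfulBEq α] (xs : List α) :
    (PySem.Set.ofList xs).Sublist xs := by
  induction xs with
  | nil => simp [PySem.Set.ofList_nil]
  | cons x xs ih =>
    rw [PySem.Set.ofList_cons]
    exact List.Sublist.cons₂ x ((discard_sub _ x).trans ih)

-- set(xs) having the same size as xs means xs has no duplicates
theorem nodup_of_ofList_length {α : Type} [BEq α] [LawfulBEq α] (xs : List α)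
    (h : xs.length = (PySem.Set.ofList xs).length) : xs.Nodup := by
  have := (ofList_sub xs).eq_of_length h.symm
  rw [← this]
  exact PySem.Set.nodup_ofList xs

-- membership in B's fold that adds both orientations of each neighbouring pair
theorem mem_foldl_add2 (l : List (String × String)) (s : PySem.Set (String × String))
    (p : String × String) :
    p ∈ l.foldl (fun s q => PySem.Set.add (PySem.Set.add s (q.1, q.2)) (q.2, q.1)) s ↔
      p ∈ s ∨ ∃ q ∈ l, p = q ∨ p = q.swap := by
  induction l generalizing s with
  | nil => simp [List.foldl]
  | cons q l ih =>
    rw [List.foldl_cons, ih, PySem.Set.mem_add, PySem.Set.mem_add]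
    constructor
    · rintro (((h | h) | h) | h)
      · exact Or.inl h
      · exact Or.inr ⟨q, List.mem_cons_self, Or.inl (h.trans Prod.mk.eta)⟩
      · exact Or.inr ⟨q, List.mem_cons_self, Or.inr h⟩
      · obtain ⟨r, hr, hh⟩ := h
        exact Or.inr ⟨r, List.mem_cons_of_mem q hr, hh⟩
    · rintro (h | ⟨r, hr, h | h⟩) <;>
        [exact Or.inl (Or.inl (Or.inl h)); skip; skip] <;>
      rcases List.mem_cons.mp hr with rfl | hr'
      · exact Or.inl (Or.inl (Or.inr (h.trans Prod.mk.eta.symm)))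
      · exact Or.inr ⟨r, hr', Or.inl h⟩
      · exact Or.inl (Or.inr h)
      · exact Or.inr ⟨r, hr', Or.inr h⟩

-- membership in the adjacency table = one of the two orientations occurs consecutively
theorem mem_vsAdj (candidate : List String) (a b : String) :
    (a, b) ∈ vsAdj candidate ↔
      (a, b) ∈ candidate.zip (candidate.drop 1) ∨ (b, a) ∈ candidate.zip (candidate.drop 1) := by
  rw [vsAdj, mem_foldl_add2]
  constructor
  · rintro (h | ⟨q, hq, (rfl | h)⟩)
    · simp [PySem.Set.empty] at h
    · exact Or.inl hq
    · have hq' : q = (b, a) := by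
        have := congrArg Prod.swap h
        simpa using this.symm
      exact Or.inr (hq' ▸ hq)
  · rintro (h | h)
    · exact Or.inr ⟨(a, b), h, Or.inl rfl⟩
    · exact Or.inr ⟨(b, a), h, Or.inr rfl⟩

-- pairs of zip(candidate, candidate[1:]) are exactly the consecutive pairs
theorem mem_zip_drop_iff (xs : List String) (a b : String) :
    (a, b) ∈ xs.zip (xs.drop 1) ↔
      ∃ i : Nat, ∃ h : i + 1 < xs.length, xs[i] = a ∧ xs[i+1] = b := by
  rw [List.mem_iff_getElem]
  constructor
  · rintro ⟨i, h, he⟩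
    have hlen : i + 1 < xs.length := by simp [List.length_zip] at h; omega
    refine ⟨i, hlen, ?_, ?_⟩
    · have := (List.getElem_zip (l := xs) (l' := xs.drop 1) (i := i) (h := h))
      rw [this] at he
      exact (Prod.mk.injEq _ _ _ _).mp he |>.1
    · have := (List.getElem_zip (l := xs) (l' := xs.drop 1) (i := i) (h := h))
      rw [this] at he
      have h2 := (Prod.mk.injEq _ _ _ _).mp he |>.2
      rw [List.getElem_drop] at h2
      simpa [Nat.add_comm] using h2
  · rintro ⟨i, h, ha, hb⟩
    have hz : i < (xs.zip (xs.drop 1)).length := by simp [List.length_zip]; omega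
    refine ⟨i, hz, ?_⟩
    rw [List.getElem_zip, List.getElem_drop]
    simp [ha, Nat.add_comm 1 i, hb]

-- under Nodup, A's per-constraint test fires exactly when the pair is in B's table
theorem step_iff (xs : List String) (hnd : xs.Nodup) (a b : String) :
    ((xs.contains a && xs.contains b) = true ∧
      ∃ ia ib, PySem.List.index? xs a = some ia ∧ PySem.List.index? xs b = some ib ∧
        ((ia : Int) - (ib : Int)).natAbs = 1) ↔ (a, b) ∈ vsAdj xs := by
  rw [mem_vsAdj, mem_zip_drop_iff, mem_zip_drop_iff]
  constructor
  · rintro ⟨hc, ia, ib, hia, hib, habs⟩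
    obtain ⟨hla, hxa, -⟩ := PySem.List.getElem_of_index?_eq_some hia
    obtain ⟨hlb, hxb, -⟩ := PySem.List.getElem_of_index?_eq_some hib
    rcases (by omega : ib = ia + 1 ∨ ia = ib + 1) with rfl | rfl
    · exact Or.inl ⟨ia, hlb, hxa, hxb⟩
    · exact Or.inr ⟨ib, hla, hxb, hxa⟩
  · have key : ∀ i : Nat, ∀ h : i + 1 < xs.length, ∀ x y, xs[i] = x → xs[i+1] = y →
        (xs.contains x && xs.contains y) = true ∧
        PySem.List.index? xs x = some i ∧ PySem.List.index? xs y = some (i+1) := by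
      intro i h x y hx hy
      have hmx : x ∈ xs := hx ▸ List.getElem_mem _
      have hmy : y ∈ xs := hy ▸ List.getElem_mem _
      refine ⟨by simp [hmx, hmy], ?_, ?_⟩
      · obtain ⟨k, hk⟩ := Option.isSome_iff_exists.mp ((PySem.List.index?_isSome_iff xs x).mpr hmx)
        obtain ⟨hkl, hxk, -⟩ := PySem.List.getElem_of_index?_eq_some hk
        have : k = i := (List.Nodup.getElem_inj_iff hnd).mp (hxk.trans hx.symm)
        exact this ▸ hk
      · obtain ⟨k, hk⟩ := Option.isSome_iff_exists.mp ((PySem.List.index?_isSome_iff xs y).mpr hmy)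
        obtain ⟨hkl, hxk, -⟩ := PySem.List.getElem_of_index?_eq_some hk
        have : k = i + 1 := (List.Nodup.getElem_inj_iff hnd).mp (hxk.trans hy.symm)
        exact this ▸ hk
    rintro (⟨i, h, ha, hb⟩ | ⟨i, h, hb, ha⟩)
    · obtain ⟨hc, h1, h2⟩ := key i h a b ha hb
      exact ⟨hc, i, i + 1, h1, h2, by omega⟩
    · obtain ⟨hc, h1, h2⟩ := key i h b a hb ha
      exact ⟨by rw [Bool.and_comm]; exact hc, i + 1, i, h2, h1, by omega⟩

-- A's constraint loop = B's all-pass over the table, for duplicate-free candidate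
theorem loop_eq (xs : List String) (hnd : xs.Nodup) (cs : List (String × String)) :
    vsLoopA xs cs = cs.all (fun c => !(PySem.Set.contains (vsAdj xs) (c.1, c.2))) := by
  induction cs with
  | nil => rfl
  | cons c rest ih =>
    obtain ⟨a, b⟩ := c
    rw [List.all_cons]
    show vsLoopA xs ((a, b) :: rest) = _
    unfold vsLoopA
    by_cases hg : (xs.contains a && xs.contains b) = true
    · rw [if_pos hg]
      have hma : a ∈ xs := by simp_all
      have hmb : b ∈ xs := by simp_all
      obtain ⟨ia, hia⟩ := Option.isSome_iff_exists.mp ((PySem.List.index?_isSome_iff xs a).mpr hma)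
      obtain ⟨ib, hib⟩ := Option.isSome_iff_exists.mp ((PySem.List.index?_isSome_iff xs b).mpr hmb)
      rw [hia, hib]
      dsimp only
      by_cases habs : ((ia : Int) - (ib : Int)).natAbs = 1
      · rw [if_pos (by simpa using habs)]
        have hmem : (a, b) ∈ vsAdj xs := (step_iff xs hnd a b).mp ⟨hg, ia, ib, hia, hib, habs⟩
        simp [hmem]
      · rw [if_neg (by simpa using habs)]
        have hnm : (a, b) ∉ vsAdj xs := by
          intro hmem
          obtain ⟨-, ia', ib', hia', hib', habs'⟩ := (step_iff xs hnd a b).mpr hmem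
          rw [hia] at hia'; rw [hib] at hib'
          cases hia'; cases hib'
          exact habs habs'
        simp [hnm, ih]
    · rw [if_neg hg]
      have hnm : (a, b) ∉ vsAdj xs := by
        intro hmem
        exact hg ((step_iff xs hnd a b).mpr hmem).1
      simp [hnm, ih]

-- ===== VERDICT (by name: the statement is the Claim_ definition above) =====
theorem verify_seating_spec : Claim_equal_verify_seating := by
  intro names constraints candidate _
  unfold Spec_verify_seating verify_seating verify_seating_alt
  split
  · rfl
  · split
    · rfl
    · rename_i h1 h2
      simp only [bne_iff_ne, ne_eq, Decidable.not_not] at h2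
      exact loop_eq candidate (nodup_of_ofList_length candidate h2) constraints
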